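-- pv_equiv track=rewrite | github.com/jualora/MIARFID | LC/Lab/Practica 1/Ejer1_Repaso_Python_Juan_Antonio_Lopez_Ramirez.py | ej1
-- ===== SOURCE A (Python) =====
-- def ej1(cadena):
--     categorias = {}
--
--     #Recorremos cada subcadena y guardamos su categoría correspondiente.
--     #Si esa categoría está en el diccionario, aumentamos en 1 su valor actual. Si no, la añadimos con un valor de 1.
--     for subcadena in cadena.split(" "):
--         cat = subcadena.split("/")[1]
--         if cat not in categorias:
--             categorias[cat] = 1
--         else:
--             categorias[cat] += 1
--
--     #Ordenamos alfabéticamente el diccionario, guardando el resultado en una lista de tuplas.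
--     #Con dicha lista, formamos nuestro diccionario ya ordenado.
--     aux = sorted(categorias.items())
--     res = {}
--     for elem in aux:
--         res[elem[0]] = elem[1]
--
--     return res
-- ===== SOURCE B (Python) =====
-- def _runs(cats):
--     # cats is sorted; collect each maximal run of equal values as a (value, length) pair
--     res = []
--     i = 0
--     while i < len(cats):
--         j = i + 1
--         while j < len(cats) and cats[j] == cats[i]:
--             j += 1
--         res.append((cats[i], j - i))
--         i = j
--     return res
--
--
-- def ej1(cadena):
--     cats = sorted(subcadena.split("/")[1] for subcadena in cadena.split(" "))
--     return dict(_runs(cats))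
-- ===== Notes on version B (the rewrite author's own statement) =====
-- stated objective: alternative
-- what changed: replaces the dict-accumulation scan plus separate items-sort-and-rebuild with sorting the category list once and run-length grouping consecutive equal categories
import Mathlib
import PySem

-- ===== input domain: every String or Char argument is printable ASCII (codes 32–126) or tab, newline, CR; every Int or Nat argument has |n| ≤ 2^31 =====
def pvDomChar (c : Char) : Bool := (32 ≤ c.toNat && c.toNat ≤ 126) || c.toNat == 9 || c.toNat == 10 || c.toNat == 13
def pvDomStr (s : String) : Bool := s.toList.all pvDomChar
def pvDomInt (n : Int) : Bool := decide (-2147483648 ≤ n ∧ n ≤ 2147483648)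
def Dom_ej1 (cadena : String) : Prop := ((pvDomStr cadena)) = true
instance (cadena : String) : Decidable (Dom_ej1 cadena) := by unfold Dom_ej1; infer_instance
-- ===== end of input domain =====

-- B replaces A's dict-accumulation scan plus separate items-sort-and-rebuild by sorting the
-- category list once and run-length grouping consecutive equal categories (alternative, not faster).

-- shared shape of the Python expression subcadena.split("/")[1]; the sep " "/"/" is nonempty so
-- split? is always some; pyGetD's default "" is only reached where Python raises IndexError,
-- which Pre_ej1 excludes.
def pvCat (subcadena : String) : String :=
  PySem.List.pyGetD ((PySem.Str.split? subcadena "/").getD []) 1 ""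

-- ===== PORT A =====
def ej1 (cadena : String) : List (String × Int) :=
  let categorias : PySem.Dict String Int :=
    ((PySem.Str.split? cadena " ").getD []).foldl
      (fun d subcadena =>
        let cat := pvCat subcadena
        if d.contains cat = false then d.insert cat 1
        else d.insert cat (d.getD cat 0 + 1))
      PySem.Dict.empty
  let aux := PySem.List.sorted2 categorias.items (fun p => p.1) (fun p => p.2) false
  let res := aux.foldl (fun d elem => d.insert elem.1 elem.2) PySem.Dict.empty
  res.items

-- ===== PORT B =====
-- _runs: the outer while-loop advances i to the end of the current run, i.e. recurses on the
-- suffix cats[i:]; the inner while computes j - i - 1 = length of the maximal prefix of the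
-- tail equal to cats[i] (takeWhile) — exact transcription of the index loops.
def runsAux : List String → List (String × Int)
  | [] => []
  | c :: rest =>
    let run := rest.takeWhile (fun x => x == c)
    (c, (1 : Int) + run.length) :: runsAux (rest.drop run.length)
termination_by l => l.length
decreasing_by
  simp only [List.length_cons, List.length_drop]
  omega

def ej1_alt (cadena : String) : List (String × Int) :=
  let cats := PySem.List.sorted
    (((PySem.Str.split? cadena " ").getD []).map (fun subcadena => pvCat subcadena))
    (fun x => x) false
  (PySem.Dict.ofList (runsAux cats)).items

-- ===== PRECONDITION & SPEC =====
-- Pre_ej1: every space-separated word contains "/" (its split has an index 1); on any other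
-- input the Python A (and B alike) raises IndexError at subcadena.split("/")[1].
def Pre_ej1 (cadena : String) : Prop :=
  ∀ w ∈ (PySem.Str.split? cadena " ").getD [],
    2 ≤ ((PySem.Str.split? w "/").getD []).length
instance (cadena : String) : Decidable (Pre_ej1 cadena) := by unfold Pre_ej1; infer_instance

def pvWitness_ej1 : String := "el/DT gato/N come/V el/DT raton/N"

def Spec_ej1 (cadena : String) (out : List (String × Int)) : Prop := out = ej1_alt cadena
instance (cadena : String) (out : List (String × Int)) : Decidable (Spec_ej1 cadena out) := by unfold Spec_ej1; infer_instance

-- ===== CLAIM (what is proved, stated in full; the proofs are below) =====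
def Claim_equal_ej1 : Prop := ∀ (cadena : String), Dom_ej1 cadena → Pre_ej1 cadena → Spec_ej1 cadena (ej1 cadena)

-- ===== LEMMAS AND PROOFS =====

theorem insertBy_congr {α : Type} (before before' : α → α → Bool) (x : α) (ys : List α)
    (h : ∀ y ∈ ys, before x y = before' x y) :
    PySem.List.insertBy before x ys = PySem.List.insertBy before' x ys := by
  induction ys with
  | nil => rfl
  | cons y ys ih =>
    simp only [PySem.List.insertBy]
    rw [h y (by simp)]
    split
    · rfl
    · rw [ih (fun z hz => h z (by simp [hz]))]

theorem foldl_insertBy_congr {α : Type} (before before' : α → α → Bool) :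
    ∀ (xs acc : List α), (∀ a ∈ xs, ∀ b ∈ acc, before a b = before' a b) →
      (∀ a ∈ xs, ∀ b ∈ xs, before a b = before' a b) →
      xs.foldl (fun acc x => PySem.List.insertBy before x acc) acc
        = xs.foldl (fun acc x => PySem.List.insertBy before' x acc) acc := by
  intro xs
  induction xs with
  | nil => intro acc _ _; rfl
  | cons x xs ih =>
    intro acc h1 h2
    simp only [List.foldl_cons]
    rw [insertBy_congr before before' x acc (fun y hy => h1 x (by simp) y hy)]
    apply ih
    · intro a ha b hb
      rcases (PySem.List.mem_insertBy _ _ _ _).mp hb with rfl | hb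
      · exact h2 a (by simp [ha]) b (by simp)
      · exact h1 a (by simp [ha]) b hb
    · intro a ha b hb
      exact h2 a (by simp [ha]) b (by simp [hb])

-- on a list with pairwise-distinct first components, Python's tuple sort is the sort by fst
theorem sorted2_eq_sorted_fst (l : List (String × Int)) (h : (l.map Prod.fst).Nodup) :
    PySem.List.sorted2 l (fun p => p.1) (fun p => p.2) false
      = PySem.List.sorted l (fun p => p.1) false := by
  rw [PySem.List.sorted_eq_foldl_insertBy]
  show l.foldl (fun acc x => PySem.List.insertBy
      (fun a b => decide (a.1 < b.1) || !decide (b.1 < a.1) && decide (a.2 < b.2)) x acc) []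
    = _
  apply foldl_insertBy_congr
  · simp
  · intro a ha b hb
    by_cases hab : a = b
    · subst hab; simp
    · have hfst : a.1 ≠ b.1 := fun e => hab (List.inj_on_of_nodup_map h ha hb e)
      rcases lt_or_gt_of_ne hfst with hl | hl
      · simp [hl]
      · simp [hl, not_lt_of_gt hl]

-- run-length grouping of a sorted list = the sorted distinct values with their counts
theorem runsAux_sorted (s : List String) (h : s.Pairwise (· ≤ ·)) :
    runsAux s = (PySem.List.sorted (PySem.Set.ofList s) (fun x => x) false).map
      (fun k => (k, (s.count k : Int))) := by
  induction s using runsAux.induct with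
  | case1 => simp [runsAux, PySem.Set.ofList, PySem.Set.empty, PySem.List.sorted]
  | case2 c rest run ih =>
    have hrunval : ∀ x ∈ run, x = c := by
      intro x hx
      have := List.mem_takeWhile_imp (p := fun x => x == c) hx
      simpa using this
    have hsplit : run ++ rest.dropWhile (fun x => x == c) = rest :=
      List.takeWhile_append_dropWhile
    have hdrop : rest.drop run.length = rest.dropWhile (fun x => x == c) := by
      conv_lhs => rw [← hsplit]
      rw [List.drop_left]
    set rest' := rest.dropWhile (fun x => x == c) with hrest'
    rw [hdrop] at ih
    have hpc : ∀ x ∈ rest, c ≤ x := (List.pairwise_cons.mp h).1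
    have hpr : rest.Pairwise (· ≤ ·) := (List.pairwise_cons.mp h).2
    have hpr' : rest'.Pairwise (· ≤ ·) := hpr.sublist (List.dropWhile_sublist _)
    have hsub' : ∀ x ∈ rest', x ∈ rest := fun x hx => (List.dropWhile_sublist _).subset hx
    have hlt : ∀ x ∈ rest', c < x := by
      cases hr : rest' with
      | nil => simp
      | cons f t =>
        have hdw : List.dropWhile (fun x => x == c) rest = f :: t := hrest'.symm.trans hr
        have hf : (f == c) = false := by
          have := List.head_dropWhile_not (fun x => x == c) (l := rest) (by simp [hdw])
          simpa [hdw] using this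
        have hfne : c ≠ f := fun e => by simp [← e] at hf
        have hfc : c < f := lt_of_le_of_ne (hpc f (hsub' f (by rw [hr]; simp))) hfne
        intro x hx
        rcases List.mem_cons.mp hx with rfl | hx
        · exact hfc
        · have hft : List.Pairwise (· ≤ ·) (f :: t) := hr ▸ hpr'
          exact lt_of_lt_of_le hfc ((List.pairwise_cons.mp hft).1 x hx)
    have hnotin : c ∉ rest' := fun hc => lt_irrefl c (hlt c hc)
    -- counts
    have hcount_c : (c :: rest).count c = 1 + run.length := by
      conv_lhs => rw [← hsplit]
      rw [List.count_cons_self, List.count_append]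
      have h1 : run.count c = run.length := by
        rw [List.count_eq_length]
        intro b hb
        simp [hrunval b hb]
      have h2 : rest'.count c = 0 := List.count_eq_zero.mpr hnotin
      omega
    have hcount_k : ∀ k ∈ rest', (c :: rest).count k = rest'.count k := by
      intro k hk
      have hkc : k ≠ c := fun e => hnotin (e ▸ hk)
      conv_lhs => rw [← hsplit]
      rw [List.count_cons_of_ne hkc.symm, List.count_append]
      have : run.count k = 0 := List.count_eq_zero.mpr (fun hkr => hkc (hrunval k hkr))
      omega
    -- the sorted distinct values
    have hsorted : PySem.List.sorted (PySem.Set.ofList (c :: rest)) (fun x => x) false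
        = c :: PySem.List.sorted (PySem.Set.ofList rest') (fun x => x) false := by
      apply PySem.List.sorted_eq_of_perm_of_pairwise_lt
      · apply (List.perm_ext_iff_of_nodup _ (PySem.Set.nodup_ofList _)).mpr
        · intro x
          simp only [List.mem_cons, PySem.List.mem_sorted, PySem.Set.mem_ofList]
          constructor
          · rintro (rfl | hx)
            · simp
            · exact Or.inr (hsub' x hx)
          · rintro (rfl | hx)
            · exact Or.inl rfl
            · conv at hx => rw [← hsplit]
              rcases List.mem_append.mp hx with hx | hx
              · exact Or.inl (hrunval x hx)
              · exact Or.inr hx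
        · refine List.nodup_cons.mpr ⟨?_, ?_⟩
          · simp only [PySem.List.mem_sorted, PySem.Set.mem_ofList]
            exact hnotin
          · exact ((PySem.List.sorted_perm _ _ _).nodup_iff).mpr (PySem.Set.nodup_ofList _)
      · refine List.pairwise_cons.mpr ⟨?_, ?_⟩
        · intro y hy
          simp only [PySem.List.mem_sorted, PySem.Set.mem_ofList] at hy
          exact hlt y hy
        · exact PySem.List.sorted_ofList_pairwise_lt _
    rw [hsorted]
    simp only [runsAux]
    rw [hdrop, ih hpr']
    simp only [List.map_cons]
    refine congrArg₂ _ ?_ ?_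
    · have : ((c :: rest).count c : Int) = 1 + (run.length : Int) := by
        rw [hcount_c]; push_cast; ring
      rw [this]
    · apply List.map_congr_left
      intro k hk
      simp only [PySem.List.mem_sorted, PySem.Set.mem_ofList] at hk
      rw [hcount_k k hk]

theorem main_aux (cats : List String) :
    ((PySem.List.sorted2 (PySem.Dict.counter cats).items (fun p => p.1) (fun p => p.2) false).foldl
      (fun d e => d.insert e.1 e.2) PySem.Dict.empty).items
    = (PySem.Dict.ofList (runsAux (PySem.List.sorted cats (fun x => x) false))).items := by
  set T := (PySem.List.sorted (PySem.Set.ofList cats) (fun x => x) false).map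
      (fun k => (k, (cats.count k : Int))) with hT
  have hTnodup : (T.map Prod.fst).Nodup := by
    rw [hT]
    simp only [List.map_map]
    have h1 : (Prod.fst ∘ fun k => (k, (cats.count k : Int))) = id := rfl
    rw [h1, List.map_id]
    exact ((PySem.List.sorted_perm _ _ _).nodup_iff).mpr (PySem.Set.nodup_ofList _)
  have hitems := PySem.Dict.items_counter cats
  have hA1 : PySem.List.sorted2 (PySem.Dict.counter cats).items (fun p => p.1) (fun p => p.2) false = T := by
    rw [sorted2_eq_sorted_fst]
    · apply PySem.List.sorted_eq_of_perm_of_pairwise_lt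
      · rw [hT, hitems]
        exact ((PySem.List.sorted_perm _ _ _).map _)
      · rw [hT]
        apply List.pairwise_map.mpr
        have := PySem.List.sorted_ofList_pairwise_lt cats
        exact this.imp (fun hab => hab)
    · rw [hitems]
      simp only [List.map_map]
      have h1 : (Prod.fst ∘ fun k => (k, (cats.count k : Int))) = id := rfl
      rw [h1, List.map_id]
      exact PySem.Set.nodup_ofList _
  have hfoldT : ((T.foldl (fun d e => d.insert e.1 e.2) PySem.Dict.empty)).items = T := by
    have h2 := PySem.Dict.items_foldl_insert_fresh T Prod.fst Prod.snd PySem.Dict.empty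
      (by intro a _; exact PySem.Dict.contains_empty _) hTnodup
    simpa using h2
  have hs : (PySem.List.sorted cats (fun x => x) false).Pairwise (· ≤ ·) := by
    have := PySem.List.sorted_pairwise cats (fun x => x)
    simpa using this
  have hB1 : runsAux (PySem.List.sorted cats (fun x => x) false) = T := by
    rw [runsAux_sorted _ hs, hT]
    have hperm : (PySem.Set.ofList (PySem.List.sorted cats (fun x => x) false)).Perm
        (PySem.Set.ofList cats) := by
      apply (List.perm_ext_iff_of_nodup (PySem.Set.nodup_ofList _) (PySem.Set.nodup_ofList _)).mpr
      intro x
      simp [PySem.Set.mem_ofList, PySem.List.mem_sorted]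
    rw [PySem.List.sorted_eq_sorted_of_perm _ _ _ (fun a b e => e) hperm]
    apply List.map_congr_left
    intro k _
    rw [(PySem.List.sorted_perm cats (fun x => x) false).count_eq k]
  rw [hA1, hB1, hfoldT]
  have h3 : (PySem.Dict.ofList T).items = T := hfoldT
  rw [h3]

-- ===== VERDICT (by name: the statement is the Claim_ definition above) =====
theorem ej1_spec : Claim_equal_ej1 := by
  intro cadena _ _
  unfold Spec_ej1 ej1 ej1_alt
  have hfg : (fun (d : PySem.Dict String Int) subcadena =>
        let cat := pvCat subcadena
        if d.contains cat = false then d.insert cat 1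
        else d.insert cat (d.getD cat 0 + 1))
      = fun d subcadena => d.insert (pvCat subcadena) (d.getD (pvCat subcadena) 0 + 1) := by
    funext d sub
    by_cases hcx : d.contains (pvCat sub) = true
    · simp [hcx]
    · have h0 : d.getD (pvCat sub) 0 = 0 :=
        PySem.Dict.getD_of_not_contains d 0 (by simpa using hcx)
      simp [hcx, h0]
  have hcounter : ((PySem.Str.split? cadena " ").getD []).foldl
      (fun d subcadena =>
        let cat := pvCat subcadena
        if d.contains cat = false then d.insert cat 1
        else d.insert cat (d.getD cat 0 + 1)) PySem.Dict.empty
      = PySem.Dict.counter (((PySem.Str.split? cadena " ").getD []).map pvCat) := by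
    rw [← PySem.Dict.foldl_insert_getD_add_one_eq_counter, List.foldl_map, hfg]
  rw [hcounter]
  exact main_aux _
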